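-- pv_equiv track=rewrite | github.com/jedlin21/Study | Knapsack_problem/full_second.py | make_AL
-- ===== SOURCE A (Python) =====
-- def make_AL(weights):
--     A_list = []
--     for x in range(len(weights)-1):
--         A_list.append([])
--         for y in range(len(weights)-1):
--             if(x != y):
--                 A_list[x].append(y)
--     return A_list
-- ===== SOURCE B (Python) =====
-- def make_AL(weights):
--     # Incremental: row for node x+1 differs from row for node x only at index x
--     # (x+1 is replaced by x), so evolve one working row and snapshot it each step.
--     n = len(weights) - 1
--     if n <= 0:
--         return []
--     row = list(range(1, n))          # adjacency row of node 0
--     result = [row[:]]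
--     for x in range(1, n):
--         row[x - 1] = x - 1           # turn row of node x-1 into row of node x
--         result.append(row[:])
--     return result
-- ===== Notes on version B (the rewrite author's own statement) =====
-- stated objective: alternative
-- what changed: B builds the rows incrementally: it keeps one evolving working row and obtains the row of node x from the row of node x-1 by a single in-place cell update (row[x-1] = x-1), snapshotting a copy each step, instead of A's rebuilding every row by scanning all indices and filtering out y == x.
import Mathlib
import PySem

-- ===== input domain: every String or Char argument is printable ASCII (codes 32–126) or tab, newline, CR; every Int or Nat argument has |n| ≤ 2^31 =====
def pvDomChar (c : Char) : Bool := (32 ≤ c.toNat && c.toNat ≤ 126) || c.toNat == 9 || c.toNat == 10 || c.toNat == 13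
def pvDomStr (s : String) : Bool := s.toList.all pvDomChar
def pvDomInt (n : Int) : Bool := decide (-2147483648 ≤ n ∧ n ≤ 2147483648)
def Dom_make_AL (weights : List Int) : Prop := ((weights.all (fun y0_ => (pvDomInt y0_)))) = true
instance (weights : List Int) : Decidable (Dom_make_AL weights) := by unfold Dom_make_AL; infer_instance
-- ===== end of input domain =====

-- B builds the rows incrementally: one evolving working row, the row of node x obtained from
-- the row of node x-1 by a single cell update, instead of A's per-row filter scan (objective: alternative).

-- ===== PORT A =====
-- Literal port of A: outer loop appends [], inner loop appends y to A_list[x] when x ≠ y.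
-- x.toNat is exact: x ranges over range(len(weights)-1), so 0 ≤ x.
def make_AL (weights : List Int) : List (List Int) :=
  (PySem.List.pyRange 0 ((weights.length : Int) - 1) 1).foldl
    (fun A_list x =>
      (PySem.List.pyRange 0 ((weights.length : Int) - 1) 1).foldl
        (fun al y => if x ≠ y then al.modify x.toNat (fun r => r ++ [y]) else al)
        (A_list ++ [[]]))
    []

-- ===== PORT B =====
-- Port of Source B: working row starts as range(1, n); each step sets row[x-1] := x-1 and
-- appends a snapshot. 'row[x-1] = …' is List.set (x-1).toNat: the index is always
-- 0 ≤ x-1 < row.length here, where Python's assignment and List.set agree exactly.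
def make_AL_alt (weights : List Int) : List (List Int) :=
  if ((weights.length : Int) - 1) ≤ 0 then []
  else
    ((PySem.List.pyRange 1 ((weights.length : Int) - 1) 1).foldl
      (fun (st : List Int × List (List Int)) x =>
        (st.1.set (x - 1).toNat (x - 1), st.2 ++ [st.1.set (x - 1).toNat (x - 1)]))
      (PySem.List.pyRange 1 ((weights.length : Int) - 1) 1,
       [PySem.List.pyRange 1 ((weights.length : Int) - 1) 1])).2

-- ===== PRECONDITION & SPEC =====
def Spec_make_AL (weights : List Int) (out : List (List Int)) : Prop := out = make_AL_alt weights
instance (weights : List Int) (out : List (List Int)) : Decidable (Spec_make_AL weights out) := by unfold Spec_make_AL; infer_instance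

-- ===== CLAIM (what is proved, stated in full; the proofs are below) =====
def Claim_equal_make_AL : Prop := ∀ (weights : List Int), Dom_make_AL weights → Spec_make_AL weights (make_AL weights)

-- ===== LEMMAS AND PROOFS =====

-- the adjacency row of node x: all indices in [0,n) except x
def pvRow (n x : Int) : List Int :=
  PySem.List.pyRange 0 x 1 ++ PySem.List.pyRange (x + 1) n 1

theorem pv_modify_last (P : List (List Int)) (r : List Int) (f : List Int → List Int) :
    (P ++ [r]).modify P.length f = P ++ [f r] := by
  induction P with
  | nil => simp [List.modify]
  | cons a t ih => simp [List.modify] at *; exact ih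

theorem pv_inner_fold (x : Int) (ys : List Int) (P : List (List Int)) (r : List Int)
    (i : Nat) (hi : i = P.length) :
    ys.foldl (fun al y => if x ≠ y then al.modify i (fun s => s ++ [y]) else al) (P ++ [r])
      = P ++ [r ++ ys.filter (fun y => decide (x ≠ y))] := by
  subst hi
  induction ys generalizing r with
  | nil => simp
  | cons y t ih =>
    rw [List.foldl_cons]
    by_cases h : x = y
    · rw [if_neg (by simp [h]), ih, List.filter_cons_of_neg (by simp [h])]
    · rw [if_pos h, pv_modify_last, ih, List.filter_cons_of_pos (by simp [h])]
      simp

theorem pv_filter_range (x n : Int) (h0 : 0 ≤ x) (h1 : x < n) :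
    (PySem.List.pyRange 0 n 1).filter (fun y => decide (x ≠ y)) = pvRow n x := by
  unfold pvRow
  rw [PySem.List.pyRange_one_append 0 x n h0 (le_of_lt h1),
      PySem.List.pyRange_one_cons h1, List.filter_append,
      List.filter_cons_of_neg (by simp)]
  have hlo : (PySem.List.pyRange 0 x 1).filter (fun y => decide (x ≠ y)) = PySem.List.pyRange 0 x 1 := by
    apply List.filter_eq_self.mpr
    intro a ha
    have := (PySem.List.mem_pyRange_one.mp ha).2
    simp; omega
  have hhi : (PySem.List.pyRange (x + 1) n 1).filter (fun y => decide (x ≠ y)) = PySem.List.pyRange (x + 1) n 1 := by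
    apply List.filter_eq_self.mpr
    intro a ha
    have := (PySem.List.mem_pyRange_one.mp ha).1
    simp; omega
  rw [hlo, hhi]

-- A's outer fold over range(0, k) produces the rows pvRow n x in order
theorem pv_outer (n : Int) (k : Nat) (hk : (k : Int) ≤ n) :
    (PySem.List.pyRange 0 (k : Int) 1).foldl
      (fun A_list x =>
        (PySem.List.pyRange 0 n 1).foldl
          (fun al y => if x ≠ y then al.modify x.toNat (fun r => r ++ [y]) else al)
          (A_list ++ [[]]))
      []
    = (PySem.List.pyRange 0 (k : Int) 1).map (pvRow n) := by
  induction k with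
  | zero => simp [PySem.List.pyRange_one_eq_nil]
  | succ k ih =>
    have hk' : (k : Int) ≤ n := by push_cast at hk ⊢; omega
    have hsplit : PySem.List.pyRange 0 ((k : Nat) + 1 : Int) 1
        = PySem.List.pyRange 0 (k : Int) 1 ++ [(k : Int)] := by
      have := PySem.List.pyRange_one_succ_right (a := 0) (b := (k : Int)) (by positivity)
      simpa using this
    push_cast
    rw [hsplit, List.foldl_append, ih hk', List.map_append]
    have hlen : ((PySem.List.pyRange 0 (k : Int) 1).map (pvRow n)).length = k := by
      simp [PySem.List.length_pyRange_one]
    simp only [List.foldl_cons, List.foldl_nil, List.map_cons, List.map_nil]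
    rw [Int.toNat_natCast,
        pv_inner_fold ((k : Int)) _ _ _ k hlen.symm,
        pv_filter_range (k : Int) n (by positivity) (by push_cast at hk; omega)]
    simp

-- setting a list element just past a prefix
theorem pv_set_append (P : List Int) (b : Int) (Q : List Int) (a : Int) :
    (P ++ b :: Q).set P.length a = P ++ a :: Q := by
  induction P with
  | nil => simp
  | cons p t ih => simp [ih]

-- the single-cell update turns row x-1 into row x
theorem pv_row_step (n x : Int) (h1 : 1 ≤ x) (h2 : x < n) :
    (pvRow n (x - 1)).set (x - 1).toNat (x - 1) = pvRow n x := by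
  unfold pvRow
  have hlen : (PySem.List.pyRange 0 (x - 1) 1).length = (x - 1).toNat := by
    rw [PySem.List.length_pyRange_one]; omega
  have hx : PySem.List.pyRange 0 x 1 = PySem.List.pyRange 0 (x - 1) 1 ++ [x - 1] := by
    have h := PySem.List.pyRange_one_succ_right (a := 0) (b := x - 1) (by omega)
    rw [show x - 1 + 1 = x by omega] at h
    exact h
  have hmid : PySem.List.pyRange (x - 1 + 1) n 1 = x :: PySem.List.pyRange (x + 1) n 1 := by
    rw [show x - 1 + 1 = x by omega, PySem.List.pyRange_one_cons h2]
  rw [hmid, ← hlen, pv_set_append, hx]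
  simp

-- B's fold over range(1, k) yields (row of node k-1, rows of nodes 0..k-1)
theorem pv_alt_inv (n : Int) (k : Nat) (h1 : 1 ≤ (k : Int)) (hk : (k : Int) ≤ n) :
    (PySem.List.pyRange 1 (k : Int) 1).foldl
      (fun (st : List Int × List (List Int)) x =>
        (st.1.set (x - 1).toNat (x - 1), st.2 ++ [st.1.set (x - 1).toNat (x - 1)]))
      (pvRow n 0, [pvRow n 0])
    = (pvRow n ((k : Int) - 1), (PySem.List.pyRange 0 (k : Int) 1).map (pvRow n)) := by
  induction k with
  | zero => omega
  | succ k ih =>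
    by_cases hk1 : k = 0
    · subst hk1
      have e1 : PySem.List.pyRange 1 (1 : Int) 1 = [] := PySem.List.pyRange_one_eq_nil (by norm_num)
      have e2 : PySem.List.pyRange 0 (1 : Int) 1 = [0] := by decide
      simp [e1, e2]
    · have hk' : 1 ≤ (k : Int) := by omega
      have hk'' : (k : Int) ≤ n := by push_cast at hk ⊢; omega
      have hsplit : PySem.List.pyRange 1 ((k : Nat) + 1 : Int) 1
          = PySem.List.pyRange 1 (k : Int) 1 ++ [(k : Int)] := by
        have := PySem.List.pyRange_one_succ_right (a := 1) (b := (k : Int)) hk'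
        simpa using this
      have hsplit0 : PySem.List.pyRange 0 ((k : Nat) + 1 : Int) 1
          = PySem.List.pyRange 0 (k : Int) 1 ++ [(k : Int)] := by
        have := PySem.List.pyRange_one_succ_right (a := 0) (b := (k : Int)) (by positivity)
        simpa using this
      push_cast
      rw [hsplit, List.foldl_append, ih hk' hk'', hsplit0, List.map_append]
      simp only [List.foldl_cons, List.foldl_nil]
      have hstep := pv_row_step n (k : Int) hk' (by push_cast at hk; omega)
      rw [hstep]
      simp

-- ===== VERDICT (by name: the statement is the Claim_ definition above) =====
theorem make_AL_spec : Claim_equal_make_AL := by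
  intro weights _
  unfold Spec_make_AL make_AL make_AL_alt
  by_cases h : (weights.length : Int) - 1 ≤ 0
  · rw [PySem.List.pyRange_one_eq_nil h, if_pos h]
    simp
  · obtain ⟨k, hkk⟩ : ∃ k : Nat, (k : Int) = (weights.length : Int) - 1 := ⟨weights.length - 1, by omega⟩
    have hA := pv_outer ((weights.length : Int) - 1) k (le_of_eq hkk)
    rw [hkk] at hA
    have hrow0 : PySem.List.pyRange 1 ((weights.length : Int) - 1) 1
        = pvRow ((weights.length : Int) - 1) 0 := by
      unfold pvRow
      rw [PySem.List.pyRange_one_eq_nil (le_refl 0)]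
      simp
    have hB := pv_alt_inv ((weights.length : Int) - 1) k (by omega) (le_of_eq hkk)
    rw [hkk] at hB
    rw [← hrow0] at hB
    rw [if_neg h, hA, hB]
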